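-- pv_equiv track=rewrite | github.com/jiadaizhao/LintCode | 1301-1400/1344-Counter Diagonal Sort/1344-Counter Diagonal Sort.py | CounterDiagonalSort
-- ===== SOURCE A (Python) =====
-- def CounterDiagonalSort(grids):
--     # write your code here
--     m = len(grids)
--     n = len(grids[0])
--     table = []
--     for i in range(m):
--         temp = []
--         row = i
--         col = 0
--         while row >= 0 and col < n:
--             temp.append(grids[row][col])
--             row -= 1
--             col += 1
--         table.append(temp)
--
--     for i in range(m, m + n - 1):
--         temp = []
--         row = m - 1
--         col = i - m + 1
--         while row >= 0 and col < n:
--             temp.append(grids[row][col])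
--             row -= 1
--             col += 1
--         table.append(temp)
--
--     l = min(m, n)
--     result = []
--     for t in table:
--         temp = []
--         i = 0
--         while len(temp) < l:
--             temp.append(t[i % len(t)])
--             i += 1
--         result.append(temp)
--
--     return sorted(result)
-- ===== SOURCE B (Python) =====
-- def CounterDiagonalSort(grids):
--     m, n = len(grids), len(grids[0])
--     # scatter pass: one sweep over the grid, bucketing each cell into its diagonal
--     table = [[] for _ in range(m + n - 1)]
--     for c in range(n):
--         for r in range(m):
--             table[r + c].append(grids[r][c])
--     l = min(m, n)
--     return sorted([t[i % len(t)] for i in range(l)] for t in table)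
-- ===== Notes on version B (the rewrite author's own statement) =====
-- stated objective: alternative
-- what changed: Replaces A's per-diagonal gather (two row/col pointer-walk loops, one walk per diagonal) with a single scatter sweep over the whole grid that buckets each cell grids[r][c] into table[r+c], and replaces the while-append cycling with a closed-form modulo comprehension.
-- outside the precondition, e.g. on CounterDiagonalSort([[]]): A returns [[]], B returns []
import Mathlib
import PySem

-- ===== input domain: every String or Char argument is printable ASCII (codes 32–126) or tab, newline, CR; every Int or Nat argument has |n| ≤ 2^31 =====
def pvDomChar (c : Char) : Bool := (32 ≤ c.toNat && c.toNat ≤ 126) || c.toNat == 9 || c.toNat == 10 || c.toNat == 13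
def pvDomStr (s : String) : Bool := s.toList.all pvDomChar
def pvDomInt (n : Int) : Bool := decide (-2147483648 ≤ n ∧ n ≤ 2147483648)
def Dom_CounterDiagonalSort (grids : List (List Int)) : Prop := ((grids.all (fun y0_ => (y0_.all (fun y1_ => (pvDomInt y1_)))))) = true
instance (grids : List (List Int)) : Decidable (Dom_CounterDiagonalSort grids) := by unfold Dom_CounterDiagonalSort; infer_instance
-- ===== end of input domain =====

-- B replaces A's per-diagonal gather walks with one scatter sweep bucketing grids[r][c]
-- into table[r+c], and the while-cycling with a modulo comprehension. Equal on Pre_.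

-- ===== PORT A =====
-- the inner 'while row >= 0 and col < n' walk of A
def pvWalkA (grids : List (List Int)) (n : Int) (row col : Int) : List Int :=
  if _h : 0 ≤ row ∧ col < n then
    PySem.List.pyGetD (PySem.List.pyGetD grids row []) col 0 :: pvWalkA grids n (row - 1) (col + 1)
  else []
termination_by (row + 1).toNat
decreasing_by omega

-- the 'while len(temp) < l: temp.append(t[i % len(t)])' loop of A
def pvCycleA (t : List Int) (l : Int) (temp : List Int) (i : Int) : List Int :=
  if _h : (temp.length : Int) < l then
    pvCycleA t l (temp ++ [PySem.List.pyGetD t (PySem.Int.mod i (t.length : Int)) 0]) (i + 1)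
  else temp
termination_by (l - temp.length).toNat
decreasing_by simp; omega

def CounterDiagonalSort (grids : List (List Int)) : List (List Int) :=
  let m : Int := grids.length
  let n : Int := (PySem.List.pyGetD grids 0 []).length
  let table : List (List Int) :=
    (PySem.List.pyRange 0 m 1).map (fun i => pvWalkA grids n i 0) ++
    (PySem.List.pyRange m (m + n - 1) 1).map (fun i => pvWalkA grids n (m - 1) (i - m + 1))
  let l : Int := min m n
  let result : List (List Int) := table.map (fun t => pvCycleA t l [] 0)
  PySem.List.sorted result (fun x => x) false

-- ===== PORT B =====
-- 'table[d].append(x)' for 0 ≤ d < len table (the only indices B's sweep produces,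
-- since d = r + c with r, c ≥ 0), walking the bucket list; exact on that range
def pvAppendAt (tb : List (List Int)) (d : Int) (x : Int) : List (List Int) :=
  match tb with
  | [] => []
  | t :: ts => if d = 0 then (t ++ [x]) :: ts else t :: pvAppendAt ts (d - 1) x

def CounterDiagonalSort_alt (grids : List (List Int)) : List (List Int) :=
  let m : Int := grids.length
  let n : Int := (PySem.List.pyGetD grids 0 []).length
  let table0 : List (List Int) := (PySem.List.pyRange 0 (m + n - 1) 1).map (fun _ => [])
  let table : List (List Int) :=
    (PySem.List.pyRange 0 n 1).foldl (fun tb c =>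
      (PySem.List.pyRange 0 m 1).foldl (fun tb r =>
        pvAppendAt tb (r + c) (PySem.List.pyGetD (PySem.List.pyGetD grids r []) c 0)) tb) table0
  let l : Int := min m n
  let result : List (List Int) :=
    table.map (fun t => (PySem.List.pyRange 0 l 1).map
      (fun i => PySem.List.pyGetD t (PySem.Int.mod i (t.length : Int)) 0))
  PySem.List.sorted result (fun x => x) false

-- ===== PRECONDITION & SPEC =====
-- Pre_ excludes empty and ragged grids, on which A raises IndexError, and zero-column
-- grids, a degenerate corner where A's m empty rows and B's m+n-1 empty rows are both
-- accidental shapes.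
def Pre_CounterDiagonalSort (grids : List (List Int)) : Prop :=
  grids ≠ [] ∧ 1 ≤ (grids.headD []).length ∧
    ∀ row ∈ grids, (grids.headD []).length ≤ row.length
instance (grids : List (List Int)) : Decidable (Pre_CounterDiagonalSort grids) := by
  unfold Pre_CounterDiagonalSort; infer_instance

def pvWitness_CounterDiagonalSort : List (List Int) := [[1, 2], [3, 4]]

def Spec_CounterDiagonalSort (grids : List (List Int)) (out : List (List Int)) : Prop := out = CounterDiagonalSort_alt grids
instance (grids : List (List Int)) (out : List (List Int)) : Decidable (Spec_CounterDiagonalSort grids out) := by unfold Spec_CounterDiagonalSort; infer_instance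

-- ===== CLAIM (what is proved, stated in full; the proofs are below) =====
def Claim_equal_CounterDiagonalSort : Prop := ∀ (grids : List (List Int)), Dom_CounterDiagonalSort grids → Pre_CounterDiagonalSort grids → Spec_CounterDiagonalSort grids (CounterDiagonalSort grids)

-- ===== LEMMAS AND PROOFS =====

-- the entries of diagonal d whose column index lies in [0, k)
def pvGather (grids : List (List Int)) (M d k : Int) : List Int :=
  (PySem.List.pyRange (max 0 (d - M + 1)) (min k (d + 1)) 1).map
    (fun c => PySem.List.pyGetD (PySem.List.pyGetD grids (d - c) []) c 0)

-- A's walk from (row, col) lists the diagonal entries for columns col ≤ c < min (row+col+1) n.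
theorem pvWalkA_eq (grids : List (List Int)) (n : Int) : ∀ row col : Int,
    pvWalkA grids n row col =
      (PySem.List.pyRange col (min (row + col + 1) n) 1).map
        (fun c => PySem.List.pyGetD (PySem.List.pyGetD grids (row + col - c) []) c 0) := by
  intro row col
  induction row, col using pvWalkA.induct n with
  | case1 row col h ih =>
    rw [pvWalkA, dif_pos h]
    rw [PySem.List.pyRange_one_cons (by omega)]
    simp only [List.map_cons]
    congr 1
    · congr 2; omega
    · rw [ih]
      have : min (row - 1 + (col + 1) + 1) n = min (row + col + 1) n := by omega
      rw [this]
      apply List.map_congr_left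
      intro c _
      congr 3
      omega
  | case2 row col h =>
    rw [pvWalkA, dif_neg h]
    rw [PySem.List.pyRange_one_eq_nil (by omega)]
    simp

-- A's cycle loop, with the invariant len temp = i.
theorem pvCycleA_eq (t : List Int) (l : Int) : ∀ temp : List Int, ∀ i : Int,
    (temp.length : Int) = i →
    pvCycleA t l temp i =
      temp ++ (PySem.List.pyRange i l 1).map
        (fun j => PySem.List.pyGetD t (PySem.Int.mod j (t.length : Int)) 0) := by
  intro temp i hlen
  induction temp, i using pvCycleA.induct t l with
  | case1 temp i h ih =>
    have hlen' : (((temp ++ [PySem.List.pyGetD t (PySem.Int.mod i (t.length : Int)) 0]).length : Int)) = i + 1 := by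
      simp only [List.length_append, List.length_cons, List.length_nil, Nat.cast_add,
        Nat.cast_one, Nat.cast_zero]
      omega
    rw [pvCycleA, dif_pos h]
    rw [show PySem.List.pyRange i l 1 = i :: PySem.List.pyRange (i + 1) l 1 from
      PySem.List.pyRange_one_cons (by omega)]
    rw [ih hlen']
    simp
  | case2 temp i h =>
    rw [pvCycleA, dif_neg h]
    rw [PySem.List.pyRange_one_eq_nil (by omega)]
    simp

-- A's first-loop walk is the full diagonal i (columns from the left edge)
theorem walkA_first (grids : List (List Int)) (M N i : Int)
    (_h0 : 0 ≤ i) (hiM : i < M) :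
    pvWalkA grids N i 0 = pvGather grids M i N := by
  rw [pvWalkA_eq, pvGather]
  have e1 : min (i + 0 + 1) N = min N (i + 1) := by omega
  have e2 : max 0 (i - M + 1) = 0 := by omega
  rw [e1, e2]
  apply List.map_congr_left
  intro c _
  congr 3
  omega

-- A's second-loop walk is the full diagonal i (columns from i-M+1)
theorem walkA_second (grids : List (List Int)) (M N i : Int) (hMi : M ≤ i) :
    pvWalkA grids N (M - 1) (i - M + 1) = pvGather grids M i N := by
  rw [pvWalkA_eq, pvGather]
  have e1 : min (M - 1 + (i - M + 1) + 1) N = min N (i + 1) := by omega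
  have e2 : max 0 (i - M + 1) = i - M + 1 := by omega
  rw [e1, e2]
  apply List.map_congr_left
  intro c _
  congr 3
  omega

-- pointwise behaviour of pvAppendAt
theorem pvAppendAt_getElem? (x : Int) : ∀ (tb : List (List Int)) (d : Int) (j : Nat),
    (pvAppendAt tb d x)[j]? =
      if (j : Int) = d then (tb[j]?.map (· ++ [x])) else tb[j]? := by
  intro tb
  induction tb with
  | nil => intro d j; simp [pvAppendAt]
  | cons t ts ih =>
    intro d j
    rw [pvAppendAt]
    by_cases hd : d = 0
    · subst hd
      cases j with
      | zero => simp
      | succ j => simp [Nat.cast_succ]; omega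
    · rw [if_neg hd]
      cases j with
      | zero =>
        simp only [List.getElem?_cons_zero, Nat.cast_zero]
        rw [if_neg (by omega)]
      | succ j =>
        simp only [List.getElem?_cons_succ]
        rw [ih (d - 1) j]
        by_cases hjd : (j : Int) = d - 1
        · rw [if_pos hjd, if_pos (by push_cast; omega)]
        · rw [if_neg hjd, if_neg (by push_cast; omega)]

theorem pvAppendAt_length (x : Int) : ∀ (tb : List (List Int)) (d : Int),
    (pvAppendAt tb d x).length = tb.length := by
  intro tb
  induction tb with
  | nil => intro d; simp [pvAppendAt]
  | cons t ts ih =>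
    intro d
    rw [pvAppendAt]
    by_cases hd : d = 0 <;> simp [hd, ih]

-- the inner fold over rows: index j receives exactly the append from r = j - c
theorem innerFold_getElem? (grids : List (List Int)) (M c : Int) :
    ∀ (a : Int) (tb : List (List Int)) (j : Nat), 0 ≤ a →
    ((PySem.List.pyRange a M 1).foldl (fun tb r =>
        pvAppendAt tb (r + c) (PySem.List.pyGetD (PySem.List.pyGetD grids r []) c 0)) tb)[j]? =
      if a + c ≤ (j : Int) ∧ (j : Int) < M + c then
        tb[j]?.map (· ++ [PySem.List.pyGetD (PySem.List.pyGetD grids ((j : Int) - c) []) c 0])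
      else tb[j]? := by
  intro a tb j ha
  by_cases hMa : M ≤ a
  · rw [PySem.List.pyRange_one_eq_nil hMa]
    rw [List.foldl_nil, if_neg (by omega)]
  · rw [PySem.List.pyRange_one_cons (a := a) (b := M) (by omega), List.foldl_cons]
    rw [innerFold_getElem? grids M c (a + 1) _ j (by omega)]
    by_cases h1 : a + 1 + c ≤ (j : Int) ∧ (j : Int) < M + c
    · rw [if_pos h1, if_pos (by omega)]
      rw [pvAppendAt_getElem? _ tb (a + c) j, if_neg (by omega)]
    · rw [if_neg h1]
      rw [pvAppendAt_getElem? _ tb (a + c) j]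
      by_cases h2 : (j : Int) = a + c
      · have hja : (j : Int) - c = a := by omega
        rw [if_pos h2, if_pos (by omega), hja]
      · rw [if_neg h2, if_neg (by omega)]
termination_by a => (M - a).toNat
decreasing_by omega

theorem innerFold_length (grids : List (List Int)) (M c : Int) :
    ∀ (a : Int) (tb : List (List Int)),
    ((PySem.List.pyRange a M 1).foldl (fun tb r =>
        pvAppendAt tb (r + c) (PySem.List.pyGetD (PySem.List.pyGetD grids r []) c 0)) tb).length =
      tb.length := by
  intro a tb
  by_cases hMa : M ≤ a
  · rw [PySem.List.pyRange_one_eq_nil hMa]; rfl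
  · rw [PySem.List.pyRange_one_cons (a := a) (b := M) (by omega), List.foldl_cons]
    rw [innerFold_length grids M c (a + 1), pvAppendAt_length]
termination_by a => (M - a).toNat
decreasing_by omega

-- one more column extends each bucket by its cell in that column (or leaves it alone)
theorem pvGather_succ (grids : List (List Int)) (M d c : Int) (hc : 0 ≤ c) :
    pvGather grids M d (c + 1) =
      if c ≤ d ∧ d < M + c then
        pvGather grids M d c ++ [PySem.List.pyGetD (PySem.List.pyGetD grids (d - c) []) c 0]
      else pvGather grids M d c := by
  unfold pvGather
  by_cases h : c ≤ d ∧ d < M + c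
  · rw [if_pos h]
    have e1 : min (c + 1) (d + 1) = c + 1 := by omega
    have e2 : min c (d + 1) = c := by omega
    rw [e1, e2]
    rw [PySem.List.pyRange_one_append (max 0 (d - M + 1)) c (c + 1) (by omega) (by omega)]
    rw [PySem.List.pyRange_one_singleton, List.map_append, List.map_cons, List.map_nil]
  · rw [if_neg h]
    rcases not_and_or.mp h with h' | h'
    · have : min (c + 1) (d + 1) = min c (d + 1) := by omega
      rw [this]
    · rw [PySem.List.pyRange_one_eq_nil (by omega), PySem.List.pyRange_one_eq_nil (by omega)]

-- invariant of the outer fold: after columns [0, c), bucket j holds pvGather j c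
theorem outerFold_getElem? (grids : List (List Int)) (M N D : Int) (hD : D = M + N - 1) :
    ∀ (c : Int) (tb : List (List Int)), 0 ≤ c → c ≤ N →
    (∀ j : Nat, (j : Int) < D → tb[j]? = some (pvGather grids M (j : Int) c)) →
    ∀ j : Nat, (j : Int) < D →
    ((PySem.List.pyRange c N 1).foldl (fun tb c =>
        (PySem.List.pyRange 0 M 1).foldl (fun tb r =>
          pvAppendAt tb (r + c) (PySem.List.pyGetD (PySem.List.pyGetD grids r []) c 0)) tb) tb)[j]? =
      some (pvGather grids M (j : Int) N) := by
  intro c tb hc hcN hinv j hj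
  by_cases hNc : N ≤ c
  · have : c = N := by omega
    subst this
    rw [PySem.List.pyRange_one_eq_nil (le_refl _), List.foldl_nil]
    exact hinv j hj
  · rw [PySem.List.pyRange_one_cons (a := c) (b := N) (by omega), List.foldl_cons]
    apply outerFold_getElem? grids M N D hD (c + 1) _ (by omega) (by omega)
    · intro j' hj'
      rw [innerFold_getElem? grids M c 0 tb j' (le_refl 0)]
      rw [pvGather_succ grids M (j' : Int) c hc]
      by_cases h : 0 + c ≤ (j' : Int) ∧ (j' : Int) < M + c
      · rw [if_pos h, if_pos (by omega), hinv j' hj']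
        rfl
      · rw [if_neg h, if_neg (by omega), hinv j' hj']
    · exact hj
termination_by c => (N - c).toNat
decreasing_by omega

-- outer fold preserves the table length
theorem outerFold_length (grids : List (List Int)) (M : Int) :
    ∀ (c N : Int) (tb : List (List Int)),
    ((PySem.List.pyRange c N 1).foldl (fun tb c =>
        (PySem.List.pyRange 0 M 1).foldl (fun tb r =>
          pvAppendAt tb (r + c) (PySem.List.pyGetD (PySem.List.pyGetD grids r []) c 0)) tb) tb).length =
      tb.length := by
  intro c N tb
  by_cases hNc : N ≤ c
  · rw [PySem.List.pyRange_one_eq_nil hNc]; rfl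
  · rw [PySem.List.pyRange_one_cons (a := c) (b := N) (by omega), List.foldl_cons]
    rw [outerFold_length grids M (c + 1) N _, innerFold_length]
termination_by c N _ => (N - c).toNat
decreasing_by omega

-- indexing a comprehension over range(0, D)
theorem map_pyRange_zero_getElem? {β : Type} (f : Int → β) (D : Int) (j : Nat)
    (hj : (j : Int) < D) :
    ((PySem.List.pyRange 0 D 1).map f)[j]? = some (f (j : Int)) := by
  rw [List.getElem?_map, PySem.List.getElem?_pyRange_one, if_pos (by omega)]
  simp

-- B's table equals the list of full diagonals
theorem tableB_eq (grids : List (List Int)) (M N : Int) (_hM : 0 ≤ M) (hN : 0 ≤ N) :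
    ((PySem.List.pyRange 0 N 1).foldl (fun tb c =>
        (PySem.List.pyRange 0 M 1).foldl (fun tb r =>
          pvAppendAt tb (r + c) (PySem.List.pyGetD (PySem.List.pyGetD grids r []) c 0)) tb)
      ((PySem.List.pyRange 0 (M + N - 1) 1).map (fun _ => ([] : List Int)))) =
      (PySem.List.pyRange 0 (M + N - 1) 1).map (fun d => pvGather grids M d N) := by
  set D : Int := M + N - 1 with hD
  have hlen0 : ((PySem.List.pyRange 0 D 1).map (fun _ => ([] : List Int))).length = D.toNat := by
    rw [List.length_map, PySem.List.length_pyRange_one]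
    omega
  apply List.ext_getElem?
  intro j
  by_cases hj : (j : Int) < D
  · rw [outerFold_getElem? grids M N D rfl 0
      ((PySem.List.pyRange 0 D 1).map (fun _ => ([] : List Int))) (le_refl 0) hN ?_ j hj]
    · rw [map_pyRange_zero_getElem? _ D j hj]
    · intro j' hj'
      rw [map_pyRange_zero_getElem? _ D j' hj']
      congr 1
      unfold pvGather
      rw [PySem.List.pyRange_one_eq_nil (by omega)]
      simp
  · rw [List.getElem?_eq_none, List.getElem?_eq_none]
    · rw [List.length_map, PySem.List.length_pyRange_one]; omega
    · rw [outerFold_length, hlen0]; omega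

-- the two results fed to sorted are equal
theorem result_eq (grids : List (List Int)) (hne : grids ≠ [])
    (hn1 : 1 ≤ (PySem.List.pyGetD grids 0 ([] : List Int)).length) :
    CounterDiagonalSort grids = CounterDiagonalSort_alt grids := by
  simp only [CounterDiagonalSort, CounterDiagonalSort_alt]
  generalize hNg : ((PySem.List.pyGetD grids 0 ([] : List Int)).length : Int) = N
  generalize hMg : ((grids.length : Int)) = M
  have hN : (1 : Int) ≤ N := by rw [← hNg]; exact_mod_cast hn1
  have hM : (1 : Int) ≤ M := by
    rw [← hMg]
    cases grids with
    | nil => exact absurd rfl hne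
    | cons a t => simp
  rw [tableB_eq grids M N (by omega) (by omega)]
  have hcyc : ∀ t : List Int, pvCycleA t (min M N) [] 0 =
      (PySem.List.pyRange 0 (min M N) 1).map
        (fun j => PySem.List.pyGetD t (PySem.Int.mod j (t.length : Int)) 0) := by
    intro t
    simpa using pvCycleA_eq t (min M N) [] 0 (by simp)
  have hsplit : PySem.List.pyRange 0 (M + N - 1) 1 =
      PySem.List.pyRange 0 M 1 ++ PySem.List.pyRange M (M + N - 1) 1 :=
    PySem.List.pyRange_one_append 0 M (M + N - 1) (by omega) (by omega)
  congr 1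
  rw [hsplit, List.map_append, List.map_append, List.map_append, List.map_map, List.map_map]
  congr 1
  · rw [List.map_map]
    apply List.map_congr_left
    intro i hi
    rw [PySem.List.mem_pyRange_one] at hi
    simp only [Function.comp]
    rw [walkA_first grids M N i hi.1 hi.2, hcyc]
  · rw [List.map_map]
    apply List.map_congr_left
    intro i hi
    rw [PySem.List.mem_pyRange_one] at hi
    simp only [Function.comp]
    rw [walkA_second grids M N i hi.1, hcyc]

-- ===== VERDICT (by name: the statement is the Claim_ definition above) =====
theorem CounterDiagonalSort_spec : Claim_equal_CounterDiagonalSort := by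
  intro grids _hdom hpre
  obtain ⟨hne, hn1, _hrect⟩ := hpre
  unfold Spec_CounterDiagonalSort
  have hgd : PySem.List.pyGetD grids 0 ([] : List Int) = grids.headD [] := by
    cases grids with
    | nil => exact absurd rfl hne
    | cons a t => rw [PySem.List.pyGetD_zero_cons]; rfl
  exact result_eq grids hne (by rw [hgd]; exact hn1)
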